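-- pv_equiv track=rewrite | github.com/CobaltConcrete/DSAI_Nonogram | generatenonogram2.py | generate_clue
-- ===== SOURCE A (Python) =====
-- from typing import List
--
-- def generate_clue(line: List[str]) -> List[int]:
--     """
--     Given a list of cells (each either '#' or '_'),
--     return the Nonogram clue (consecutive '#' counts).
--     """
--     clues = []
--     count = 0
--     for cell in line:
--         if cell == '#':
--             count += 1
--         else:
--             if count > 0:
--                 clues.append(count)
--                 count = 0
--     # If the last cells were '#', append the final count
--     if count > 0:
--         clues.append(count)
--     # If no filled cells, return [0]
--     return clues if clues else [0]
-- ===== SOURCE B (Python) =====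
-- from typing import List
--
-- def generate_clue(line: List[str]) -> List[int]:
--     """Nonogram clue via a two-pointer run decomposition: skip non-'#'
--     cells, then advance a second index to the end of each maximal '#'
--     run and record the run length, instead of A's counter-and-flush pass."""
--     clues = []
--     i, n = 0, len(line)
--     while i < n:
--         if line[i] != '#':
--             i += 1
--         else:
--             j = i + 1
--             while j < n and line[j] == '#':
--                 j += 1
--             clues.append(j - i)
--             i = j
--     return clues if clues else [0]
-- ===== Notes on version B (the rewrite author's own statement) =====
-- stated objective: alternative
-- what changed: Replaces A's single pass with a running counter and end-of-loop flush by a recursive run decomposition: skip non-'#' cells, measure each maximal '#' run in one inner scan, and cons its length onto the recursive result.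
import Mathlib
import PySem

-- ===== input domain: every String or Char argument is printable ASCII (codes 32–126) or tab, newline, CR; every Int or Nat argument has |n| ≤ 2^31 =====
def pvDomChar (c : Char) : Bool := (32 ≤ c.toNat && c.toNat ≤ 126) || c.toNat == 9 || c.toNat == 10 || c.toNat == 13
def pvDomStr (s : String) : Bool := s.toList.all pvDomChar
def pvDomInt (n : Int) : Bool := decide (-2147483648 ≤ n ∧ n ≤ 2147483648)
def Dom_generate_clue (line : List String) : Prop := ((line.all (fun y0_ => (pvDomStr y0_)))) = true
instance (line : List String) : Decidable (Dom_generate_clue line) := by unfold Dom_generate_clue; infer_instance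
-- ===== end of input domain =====

-- B replaces A's counter-accumulator-and-flush pass by a two-pointer run decomposition (alternative; same O(n) cost).

-- ===== PORT A =====
-- A: one fold carrying (clues, count); flush pending count at the end; [0] if empty.
def generate_clue (line : List String) : List Int :=
  let s := line.foldl (fun (s : List Int × Int) cell =>
    if cell = "#" then (s.1, s.2 + 1)
    else if s.2 > 0 then (s.1 ++ [s.2], (0 : Int)) else s) ([], 0)
  let clues := if s.2 > 0 then s.1 ++ [s.2] else s.1
  if clues = [] then [0] else clues

-- ===== PORT B =====
-- B's inner while loop: advance j past the current maximal '#' run.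
def pvRunEnd (line : List String) (n j : Nat) : Nat :=
  if j < n ∧ line.getD j "" = "#" then pvRunEnd line n (j + 1) else j
termination_by n - j
decreasing_by omega

-- termination fact the outer-loop port cites (the inner loop only moves j forward)
lemma pvRunEnd_ge (line : List String) (n j : Nat) : j ≤ pvRunEnd line n j := by
  rw [pvRunEnd]
  split
  · have := pvRunEnd_ge line n (j + 1); omega
  · exact le_rfl
termination_by n - j
decreasing_by omega

-- B's outer while loop over index i, accumulating clues.
def pvOuter (line : List String) (n i : Nat) (clues : List Int) : List Int :=
  if i < n then
    if line.getD i "" ≠ "#" then pvOuter line n (i + 1) clues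
    else
      let j := pvRunEnd line n (i + 1)
      pvOuter line n j (clues ++ [((j : Int) - (i : Int))])
  else clues
termination_by n - i
decreasing_by
  · omega
  · have := pvRunEnd_ge line n (i + 1); omega

def generate_clue_alt (line : List String) : List Int :=
  let clues := pvOuter line line.length 0 []
  if clues = [] then [0] else clues

-- ===== PRECONDITION & SPEC =====
def Spec_generate_clue (line : List String) (out : List Int) : Prop := out = generate_clue_alt line
instance (line : List String) (out : List Int) : Decidable (Spec_generate_clue line out) := by unfold Spec_generate_clue; infer_instance

-- ===== CLAIM (what is proved, stated in full; the proofs are below) =====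
def Claim_equal_generate_clue : Prop := ∀ (line : List String), Dom_generate_clue line → Spec_generate_clue line (generate_clue line)

-- ===== LEMMAS AND PROOFS =====

-- list-level description of B's run decomposition (proof-side only)
def pvRuns (cells : List String) : List Int :=
  match cells with
  | [] => []
  | c :: cs =>
    if c ≠ "#" then pvRuns cs
    else (1 + (cs.takeWhile (· == "#")).length : Int) :: pvRuns (cs.dropWhile (· == "#"))
termination_by cells.length
decreasing_by
  · simp
  · have := List.length_dropWhile_le (p := (· == "#")) (l := cs); simp; omega

-- A's flushed fold result, characterised relative to a pending count c.
def pvEmit (c : Int) (l : List String) : List Int :=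
  match l with
  | [] => if c > 0 then [c] else []
  | x :: xs => if x = "#" then pvEmit (c + 1) xs
               else if c > 0 then c :: pvEmit 0 xs else pvEmit 0 xs

lemma pvFold_emit (l : List String) : ∀ (acc : List Int) (c : Int), 0 ≤ c →
    (let s := l.foldl (fun (s : List Int × Int) cell =>
      if cell = "#" then (s.1, s.2 + 1)
      else if s.2 > 0 then (s.1 ++ [s.2], (0 : Int)) else s) (acc, c)
     if s.2 > 0 then s.1 ++ [s.2] else s.1) = acc ++ pvEmit c l := by
  induction l with
  | nil =>
    intro acc c _
    simp [pvEmit]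
    split_ifs <;> simp
  | cons x xs ih =>
    intro acc c hc
    simp only [List.foldl_cons, pvEmit]
    by_cases hx : x = "#"
    · simp only [hx]
      exact ih acc (c + 1) (by omega)
    · simp only [if_neg hx]
      by_cases hcp : c > 0
      · simp only [if_pos hcp]
        rw [ih (acc ++ [c]) 0 le_rfl]
        simp
      · have hc0 : c = 0 := by omega
        simp only [hc0]
        exact ih acc 0 le_rfl

-- pvEmit vs the run decomposition: the pending count c is absorbed into the next run.
lemma pvEmit_runs (l : List String) :
    (∀ c : Int, c > 0 →
      pvEmit c l = (c + (l.takeWhile (· == "#")).length : Int) :: pvRuns (l.dropWhile (· == "#")))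
    ∧ pvEmit 0 l = pvRuns l := by
  induction l with
  | nil =>
    constructor
    · intro c hc; simp [pvEmit, pvRuns, hc]
    · simp [pvEmit, pvRuns]
  | cons x xs ih =>
    by_cases hx : x = "#"
    · constructor
      · intro c hc
        have h1 := ih.1 (c + 1) (by omega)
        simp only [pvEmit, hx] at *
        rw [h1]
        simp [List.takeWhile, List.dropWhile]
        omega
      · have h1 := ih.1 1 (by omega)
        simp only [pvEmit, hx, pvRuns]
        simp [h1]
    · constructor
      · intro c hc
        have h2 := ih.2
        simp only [pvEmit, if_neg hx, if_pos hc]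
        rw [h2]
        have hb : (x == "#") = false := by simp [hx]
        simp [List.dropWhile, List.takeWhile, hb, pvRuns, hx]
      · have h2 := ih.2
        simp only [pvEmit, pvRuns]
        split_ifs with h
        · omega
        · rw [h2]

-- dropWhile is drop past the takeWhile prefix (used to re-index the tail)
lemma pvDropWhile_drop (L : List String) :
    L.dropWhile (· == "#") = L.drop ((L.takeWhile (· == "#")).length) := by
  induction L with
  | nil => rfl
  | cons x xs ih =>
    cases hx : (x == "#") with
    | true => simp [hx, ih]
    | false => simp [hx]

-- the inner while loop computes i plus the length of the maximal '#' run starting at i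
lemma pvRunEnd_eq (line : List String) : ∀ j : Nat,
    pvRunEnd line line.length j = j + ((line.drop j).takeWhile (· == "#")).length := by
  intro j
  by_cases hj : j < line.length
  · have hdrop : line.drop j = line.getD j "" :: line.drop (j + 1) := by
      rw [List.getD_eq_getElem line "" hj]
      exact List.drop_eq_getElem_cons hj
    by_cases hsh : line.getD j "" = "#"
    · have hb : (line.getD j "" == "#") = true := by
        simp only [beq_iff_eq]; exact hsh
      rw [pvRunEnd, if_pos ⟨hj, hsh⟩, pvRunEnd_eq line (j + 1), hdrop, List.takeWhile_cons, hb]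
      simp
      omega
    · have hb : (line.getD j "" == "#") = false := by
        simp only [beq_eq_false_iff_ne, ne_eq]; exact hsh
      rw [pvRunEnd, if_neg (by tauto), hdrop, List.takeWhile_cons, hb]
      simp
  · rw [pvRunEnd, if_neg (by omega)]
    simp [List.drop_eq_nil_of_le (by omega : line.length ≤ j)]
termination_by j => line.length - j
decreasing_by omega

-- the outer while loop from index i produces the runs of the remaining suffix
lemma pvOuter_runs (line : List String) : ∀ (i : Nat) (clues : List Int),
    pvOuter line line.length i clues = clues ++ pvRuns (line.drop i) := by
  intro i clues
  by_cases hi : i < line.length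
  · have hdrop : line.drop i = line.getD i "" :: line.drop (i + 1) := by
      rw [List.getD_eq_getElem line "" hi]
      exact List.drop_eq_getElem_cons hi
    by_cases hsh : line.getD i "" = "#"
    · rw [pvOuter, if_pos hi, if_neg (not_not_intro hsh)]
      have hre := pvRunEnd_eq line (i + 1)
      set t := ((line.drop (i + 1)).takeWhile (· == "#")).length with ht
      have hge : i + 1 ≤ pvRunEnd line line.length (i + 1) := pvRunEnd_ge _ _ _
      rw [pvOuter_runs line (pvRunEnd line line.length (i + 1)) _]
      rw [hdrop]
      have hruns : pvRuns (line.getD i "" :: line.drop (i + 1))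
          = ((1 + t : Int)) :: pvRuns ((line.drop (i + 1)).dropWhile (· == "#")) := by
        rw [pvRuns, if_neg (not_not_intro hsh), ← ht]
      rw [hruns]
      have hdw : (line.drop (i + 1)).dropWhile (· == "#") = line.drop (i + 1 + t) := by
        rw [pvDropWhile_drop, ← ht, List.drop_drop]
      rw [hdw, hre]
      simp
      omega
    · rw [pvOuter, if_pos hi, if_pos hsh]
      rw [pvOuter_runs line (i + 1) clues, hdrop, pvRuns, if_pos hsh]
  · rw [pvOuter, if_neg (by omega)]
    simp [List.drop_eq_nil_of_le (by omega : line.length ≤ i), pvRuns]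
termination_by i => line.length - i
decreasing_by all_goals (have := pvRunEnd_ge line line.length (i + 1); omega)

-- ===== VERDICT (by name: the statement is the Claim_ definition above) =====
theorem generate_clue_spec : Claim_equal_generate_clue := by
  intro line _
  have h := pvFold_emit line [] 0 le_rfl
  simp only at h
  simp only [Spec_generate_clue, generate_clue, generate_clue_alt]
  rw [h, List.nil_append, (pvEmit_runs line).2, pvOuter_runs line 0 [], List.nil_append,
    List.drop_zero]
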